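-- pv_equiv track=rewrite | github.com/SoftSec-KAIST/Reassessor | get_nofunc.py | is_same_jump
-- ===== SOURCE A (Python) =====
-- def is_same_jump(op1, op2):
--     # only first 3 bytes
--     # http://www.unixwiz.net/techtips/x86-jumps.html
--     jumps = [
--         ["jo"],
--         ["jno"],
--         ["js"],
--         ["jns"],
--         ["je", "jz"],
--         ["jne", "jnz"],
--         ["jb", "jna", "jc"],
--         ["jnb", "jae", "jnc"],
--         ["jbe", "jna"],
--         ["ja", "jnb"],
--         ["jl", "jng"],
--         ["jge", "jnl"],
--         ["jle", "jng"],
--         ["jg", "jnl"],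
--         ["jp", "jpe"],
--         ["jnp", "jpo"],
--         ["jcx", "jec"]
--     ]
--     for jump in jumps:
--         if op1 in jump and op2 in jump:
--             return True
--     return False
-- ===== SOURCE B (Python) =====
-- # Each mnemonic maps to a bitmask of the jump-equivalence groups it belongs to
-- # (bit i = group i of the table at http://www.unixwiz.net/techtips/x86-jumps.html).
-- # Two mnemonics are the same jump iff their masks share a bit.
-- _MASK = {
--     "jo": 0x00001, "jno": 0x00002, "js": 0x00004, "jns": 0x00008,
--     "je": 0x00010, "jz": 0x00010,
--     "jne": 0x00020, "jnz": 0x00020,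
--     "jb": 0x00040, "jc": 0x00040, "jna": 0x00140,   # groups 6 and 8
--     "jnb": 0x00280, "jae": 0x00080, "jnc": 0x00080,  # jnb: groups 7 and 9
--     "jbe": 0x00100, "ja": 0x00200,
--     "jl": 0x00400, "jng": 0x01400,                   # jng: groups 10 and 12
--     "jge": 0x00800, "jnl": 0x02800,                  # jnl: groups 11 and 13
--     "jle": 0x01000, "jg": 0x02000,
--     "jp": 0x04000, "jpe": 0x04000,
--     "jnp": 0x08000, "jpo": 0x08000,
--     "jcx": 0x10000, "jec": 0x10000,
-- }
--
--
-- def is_same_jump(op1, op2):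
--     return (_MASK.get(op1, 0) & _MASK.get(op2, 0)) != 0
-- ===== Notes on version B (the rewrite author's own statement) =====
-- stated objective: alternative
-- what changed: Replaces the per-call scan over all 17 jump groups by a flat mnemonic-to-bitmask table (bit i = membership in group i); the call is two O(1) lookups and one bitwise AND against zero.
import Mathlib
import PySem

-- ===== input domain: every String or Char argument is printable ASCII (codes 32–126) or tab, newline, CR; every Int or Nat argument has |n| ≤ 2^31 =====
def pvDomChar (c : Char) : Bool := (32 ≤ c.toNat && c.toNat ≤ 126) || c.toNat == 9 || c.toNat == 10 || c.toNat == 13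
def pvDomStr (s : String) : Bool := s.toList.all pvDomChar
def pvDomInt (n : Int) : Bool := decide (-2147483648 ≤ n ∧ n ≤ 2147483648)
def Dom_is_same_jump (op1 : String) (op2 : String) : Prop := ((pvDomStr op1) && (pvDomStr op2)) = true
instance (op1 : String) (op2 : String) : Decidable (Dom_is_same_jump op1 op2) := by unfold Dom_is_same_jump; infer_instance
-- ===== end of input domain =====

-- B replaces A's per-call scan over the 17 jump groups by a flat mnemonic→bitmask table
-- (bit i = membership in group i); the call is two lookups and one bitwise AND (alternative form).

-- ===== PORT A =====
def jumpsA : List (List String) :=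
  [["jo"], ["jno"], ["js"], ["jns"], ["je", "jz"], ["jne", "jnz"],
   ["jb", "jna", "jc"], ["jnb", "jae", "jnc"], ["jbe", "jna"], ["ja", "jnb"],
   ["jl", "jng"], ["jge", "jnl"], ["jle", "jng"], ["jg", "jnl"],
   ["jp", "jpe"], ["jnp", "jpo"], ["jcx", "jec"]]

-- the 'for jump in jumps' loop with early 'return True'
def loopA (op1 op2 : String) : List (List String) → Bool
  | [] => false
  | j :: rest => if op1 ∈ j ∧ op2 ∈ j then true else loopA op1 op2 rest

def is_same_jump (op1 : String) (op2 : String) : Bool :=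
  loopA op1 op2 jumpsA

-- ===== PORT B =====
-- _MASK: mnemonic → bitmask of group memberships
def maskDict : PySem.Dict String Int :=
  PySem.Dict.ofList
    [("jo", 0x00001), ("jno", 0x00002), ("js", 0x00004), ("jns", 0x00008),
     ("je", 0x00010), ("jz", 0x00010),
     ("jne", 0x00020), ("jnz", 0x00020),
     ("jb", 0x00040), ("jc", 0x00040), ("jna", 0x00140),
     ("jnb", 0x00280), ("jae", 0x00080), ("jnc", 0x00080),
     ("jbe", 0x00100), ("ja", 0x00200),
     ("jl", 0x00400), ("jng", 0x01400),
     ("jge", 0x00800), ("jnl", 0x02800),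
     ("jle", 0x01000), ("jg", 0x02000),
     ("jp", 0x04000), ("jpe", 0x04000),
     ("jnp", 0x08000), ("jpo", 0x08000),
     ("jcx", 0x10000), ("jec", 0x10000)]

def is_same_jump_alt (op1 : String) (op2 : String) : Bool :=
  decide (PySem.Int.band (maskDict.getD op1 0) (maskDict.getD op2 0) ≠ 0)

-- ===== PRECONDITION & SPEC =====
def Spec_is_same_jump (op1 : String) (op2 : String) (out : Bool) : Prop := out = is_same_jump_alt op1 op2
instance (op1 : String) (op2 : String) (out : Bool) : Decidable (Spec_is_same_jump op1 op2 out) := by unfold Spec_is_same_jump; infer_instance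

-- ===== CLAIM =====
def Claim_equal_is_same_jump : Prop := ∀ (op1 : String) (op2 : String), Dom_is_same_jump op1 op2 → Spec_is_same_jump op1 op2 (is_same_jump op1 op2)

-- ===== LEMMAS AND PROOFS =====

-- all mnemonics occurring in A's table
def mnems : List String := jumpsA.flatten

theorem loopA_false_left {op1 op2 : String} {l : List (List String)}
    (h : ∀ j ∈ l, op1 ∉ j) : loopA op1 op2 l = false := by
  induction l with
  | nil => rfl
  | cons j rest ih =>
      have hj := h j (List.mem_cons_self ..)
      simp only [loopA]
      rw [if_neg (by tauto)]
      exact ih (fun j' hj' => h j' (List.mem_cons_of_mem _ hj'))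

theorem loopA_false_right {op1 op2 : String} {l : List (List String)}
    (h : ∀ j ∈ l, op2 ∉ j) : loopA op1 op2 l = false := by
  induction l with
  | nil => rfl
  | cons j rest ih =>
      have hj := h j (List.mem_cons_self ..)
      simp only [loopA]
      rw [if_neg (by tauto)]
      exact ih (fun j' hj' => h j' (List.mem_cons_of_mem _ hj'))

theorem A_false_left {op1 op2 : String} (h : op1 ∉ mnems) : is_same_jump op1 op2 = false :=
  loopA_false_left (fun j hj hm => h (List.mem_flatten.mpr ⟨j, hj, hm⟩))

theorem A_false_right {op1 op2 : String} (h : op2 ∉ mnems) : is_same_jump op1 op2 = false :=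
  loopA_false_right (fun j hj hm => h (List.mem_flatten.mpr ⟨j, hj, hm⟩))

set_option maxRecDepth 10000 in
theorem maskKeys_sub_mnems : ∀ x ∈ maskDict.keys, x ∈ mnems := by decide

theorem getD_maskDict_zero {op : String} (h : op ∉ mnems) :
    maskDict.getD op 0 = 0 := by
  apply PySem.Dict.getD_of_not_contains
  rw [PySem.Dict.contains_eq_decide_mem_keys]
  exact decide_eq_false (fun hk => h (maskKeys_sub_mnems op hk))

theorem alt_false_left {op1 op2 : String} (h : op1 ∉ mnems) :
    is_same_jump_alt op1 op2 = false := by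
  unfold is_same_jump_alt
  rw [getD_maskDict_zero h, PySem.Int.band_comm]
  simp

theorem alt_false_right {op1 op2 : String} (h : op2 ∉ mnems) :
    is_same_jump_alt op1 op2 = false := by
  unfold is_same_jump_alt
  rw [getD_maskDict_zero h]
  simp

set_option maxRecDepth 100000 in
theorem both_in : ∀ a ∈ mnems, ∀ b ∈ mnems, is_same_jump a b = is_same_jump_alt a b := by
  decide

-- ===== VERDICT =====
theorem is_same_jump_spec : Claim_equal_is_same_jump := by
  intro op1 op2 _
  unfold Spec_is_same_jump
  by_cases h1 : op1 ∈ mnems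
  · by_cases h2 : op2 ∈ mnems
    · exact both_in op1 h1 op2 h2
    · rw [A_false_right h2, alt_false_right h2]
  · rw [A_false_left h1, alt_false_left h1]
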